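-- pv_equiv track=rewrite | github.com/adamcohen8/orbital-engagement-lab | sim/dynamics/orbit/tle.py | _checksum_ok
-- ===== SOURCE A (Python) =====
-- def _checksum_ok(line: str) -> bool:
--     if len(line) < 69 or not line[68].isdigit():
--         return False
--     total = 0
--     for ch in line[:68]:
--         if ch.isdigit():
--             total += int(ch)
--         elif ch == "-":
--             total += 1
--     return total % 10 == int(line[68])
-- ===== SOURCE B (Python) =====
-- def _checksum_ok(line: str) -> bool:
--     if len(line) < 69 or not line[68].isdigit():
--         return False
--     val = {c: i for i, c in enumerate("0123456789")}
--     val["-"] = 1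
--
--     def cks(chars, acc):
--         if not chars:
--             return acc
--         return cks(chars[1:], (acc + val.get(chars[0], 0)) % 10)
--
--     return cks(line[:68], 0) == int(line[68])
-- ===== Notes on version B (the rewrite author's own statement) =====
-- stated objective: alternative
-- what changed: Replaces the single iterative branching accumulator loop by a recursive reduction over the body that keeps the running checksum reduced modulo 10 at every step, with per-character contributions taken from a value table built once instead of if/elif branches.
import Mathlib
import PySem

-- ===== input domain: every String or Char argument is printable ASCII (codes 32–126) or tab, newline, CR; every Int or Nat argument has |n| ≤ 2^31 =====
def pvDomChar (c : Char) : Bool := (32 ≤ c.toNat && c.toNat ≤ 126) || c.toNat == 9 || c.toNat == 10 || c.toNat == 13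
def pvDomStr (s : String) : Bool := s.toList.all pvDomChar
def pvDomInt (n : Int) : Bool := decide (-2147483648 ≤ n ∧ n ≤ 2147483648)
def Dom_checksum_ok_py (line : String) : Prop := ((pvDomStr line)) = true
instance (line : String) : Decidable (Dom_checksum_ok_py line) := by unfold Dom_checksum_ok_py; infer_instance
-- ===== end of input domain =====

-- B replaces A's single iterative branching accumulator loop by a recursive
-- reduction that keeps the checksum reduced mod 10 at every step, using a
-- value table built once instead of if/elif branches; same cost, different structure.

-- int(c) for an ASCII digit character c (both ports guard by isdigit, where this is exact)
def pvDigitVal (c : Char) : Int := (c.toNat : Int) - 48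

-- ===== PORT A =====
def checksum_ok_py (line : String) : Bool :=
  let cs := line.toList
  if cs.length < 69 || !(PySem.Chars.isdigit (PySem.List.pyGetD cs 68 ' ')) then false
  else
    let total : Int := (PySem.List.slice cs none (some 68)).foldl
      (fun t ch =>
        if PySem.Chars.isdigit ch then t + pvDigitVal ch
        else if ch = '-' then t + 1 else t) 0
    decide (PySem.Int.mod total 10 = pvDigitVal (PySem.List.pyGetD cs 68 ' '))

-- ===== PORT B =====
-- val = {c: i for i, c in enumerate("0123456789")}; val["-"] = 1
def pvVal : PySem.Dict Char Int :=
  ((PySem.List.enumerate "0123456789".toList).foldl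
      (fun d p => d.insert p.2 p.1) PySem.Dict.empty).insert '-' 1

-- def cks(chars, acc): return acc if not chars else cks(chars[1:], (acc + val.get(chars[0], 0)) % 10)
def pvCks : List Char → Int → Int
  | [], acc => acc
  | c :: rest, acc => pvCks rest (PySem.Int.mod (acc + pvVal.getD c 0) 10)

def checksum_ok_py_alt (line : String) : Bool :=
  let cs := line.toList
  if cs.length < 69 || !(PySem.Chars.isdigit (PySem.List.pyGetD cs 68 ' ')) then false
  else decide (pvCks (PySem.List.slice cs none (some 68)) 0 = pvDigitVal (PySem.List.pyGetD cs 68 ' '))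

-- ===== PRECONDITION & SPEC =====
def Spec_checksum_ok_py (line : String) (out : Bool) : Prop := out = checksum_ok_py_alt line
instance (line : String) (out : Bool) : Decidable (Spec_checksum_ok_py line out) := by unfold Spec_checksum_ok_py; infer_instance

-- ===== CLAIM (what is proved, stated in full; the proofs are below) =====
def Claim_equal_checksum_ok_py : Prop := ∀ (line : String), Dom_checksum_ok_py line → Spec_checksum_ok_py line (checksum_ok_py line)

-- ===== LEMMAS AND PROOFS =====

-- A's per-character contribution, as a function
def pvContrib (c : Char) : Int :=
  if PySem.Chars.isdigit c then pvDigitVal c else if c = '-' then 1 else 0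

theorem digit_cases (c : Char) (h : PySem.Chars.isdigit c = true) :
    c = '0' ∨ c = '1' ∨ c = '2' ∨ c = '3' ∨ c = '4' ∨ c = '5' ∨ c = '6' ∨ c = '7' ∨ c = '8' ∨ c = '9' := by
  simp [PySem.Chars.isdigit, Char.le_def, UInt32.le_iff_toNat_le] at h
  obtain ⟨h1, h2⟩ := h
  have hc : c = Char.ofNat c.toNat := (Char.ofNat_toNat c).symm
  have : c.toNat = 48 ∨ c.toNat = 49 ∨ c.toNat = 50 ∨ c.toNat = 51 ∨ c.toNat = 52 ∨ c.toNat = 53 ∨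
      c.toNat = 54 ∨ c.toNat = 55 ∨ c.toNat = 56 ∨ c.toNat = 57 := by omega
  rcases this with h|h|h|h|h|h|h|h|h|h <;> rw [h] at hc <;> simp [hc]

-- B's table lookup computes A's per-character contribution
theorem val_getD (c : Char) : pvVal.getD c 0 = pvContrib c := by
  have hval : pvVal = PySem.Dict.mk
      [('0', 0), ('1', 1), ('2', 2), ('3', 3), ('4', 4), ('5', 5), ('6', 6),
       ('7', 7), ('8', 8), ('9', 9), ('-', 1)] := by decide
  by_cases hd : PySem.Chars.isdigit c = true
  · rcases digit_cases c hd with h|h|h|h|h|h|h|h|h|h <;> subst h <;> decide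
  · by_cases hm : c = '-'
    · subst hm; decide
    · have h0 : c ≠ '0' := fun h => hd (by subst h; decide)
      have h1 : c ≠ '1' := fun h => hd (by subst h; decide)
      have h2 : c ≠ '2' := fun h => hd (by subst h; decide)
      have h3 : c ≠ '3' := fun h => hd (by subst h; decide)
      have h4 : c ≠ '4' := fun h => hd (by subst h; decide)
      have h5 : c ≠ '5' := fun h => hd (by subst h; decide)
      have h6 : c ≠ '6' := fun h => hd (by subst h; decide)
      have h7 : c ≠ '7' := fun h => hd (by subst h; decide)
      have h8 : c ≠ '8' := fun h => hd (by subst h; decide)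
      have h9 : c ≠ '9' := fun h => hd (by subst h; decide)
      simp [hval, PySem.Dict.getD, PySem.Dict.get?,
        Ne.symm h0, Ne.symm h1, Ne.symm h2, Ne.symm h3, Ne.symm h4, Ne.symm h5,
        Ne.symm h6, Ne.symm h7, Ne.symm h8, Ne.symm h9, Ne.symm hm,
        pvContrib, hd, hm]

-- A's branching fold is the plain sum of the per-character contributions
theorem loop_eq (l : List Char) : ∀ (t : Int),
    l.foldl (fun t ch =>
        if PySem.Chars.isdigit ch then t + pvDigitVal ch
        else if ch = '-' then t + 1 else t) t
      = t + (l.map pvContrib).sum := by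
  induction l with
  | nil => intro t; simp
  | cons c cs ih =>
    intro t
    by_cases hd : PySem.Chars.isdigit c
    · simp [List.foldl_cons, hd, ih, pvContrib]; ring
    · by_cases hm : c = '-'
      · subst hm; simp [List.foldl_cons, hd, ih, pvContrib]; ring
      · simp [List.foldl_cons, hd, hm, ih, pvContrib]

-- B's mod-at-every-step recursion computes the sum mod 10
theorem cks_eq (l : List Char) : ∀ (acc : Int), PySem.Int.mod acc 10 = acc →
    pvCks l acc = PySem.Int.mod (acc + (l.map pvContrib).sum) 10 := by
  induction l with
  | nil => intro acc h; simpa using h.symm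
  | cons c cs ih =>
    intro acc h
    have hmod : ∀ x : Int, PySem.Int.mod x 10 = x % 10 := fun x =>
      PySem.Int.mod_eq_emod_of_pos (by norm_num)
    simp only [pvCks, List.map_cons, List.sum_cons, val_getD c]
    rw [ih _ (by simp only [hmod]; omega)]
    simp only [hmod]
    omega

-- ===== VERDICT (by name: the statement is the Claim_ definition above) =====
theorem checksum_ok_py_spec : Claim_equal_checksum_ok_py := by
  intro line _
  unfold Spec_checksum_ok_py checksum_ok_py checksum_ok_py_alt
  by_cases hg : line.toList.length < 69 || !(PySem.Chars.isdigit (PySem.List.pyGetD line.toList 68 ' '))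
  · simp only [hg, if_true]
  · simp only [hg]
    rw [loop_eq, cks_eq _ 0 (by decide)]
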